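-- pv_equiv track=rewrite | github.com/Alan-learner/python_learning | leetcode/2398_sub_array-monotonous_queue-double_pointer.py | maximumRobots
-- ===== SOURCE A (Python) =====
-- def maximumRobots(chargeTimes: list, runningCosts: list, budget: int) -> int:
--     ans = left = s = 0
--     # monotonous_queue = deque()  # 单调队列，用来递减得存储由大到小chargeTimes的下标
--     monotonous_queue = []  # 单调队列，用来递减得存储由大到小chargeTimes的下标
--     for right, (t, c) in enumerate(zip(chargeTimes, runningCosts)):
--         # 处理右端点
--         while monotonous_queue and t >= chargeTimes[monotonous_queue[-1]]:  # 判断插入前是否可以删除无用数据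
--             monotonous_queue.pop()
--         monotonous_queue.append(right)
--         s += c
--         # 处理左端点
--         while monotonous_queue and chargeTimes[monotonous_queue[0]] + (right - left + 1) * s > budget:
--             if monotonous_queue[0] == left:
--                 # monotonous_queue.popleft()
--                 monotonous_queue.pop(0)
--             s -= runningCosts[left]
--             left += 1  # 超出总支出，弹出左端点
--         ans = max(ans, right - left + 1)
--     return ans
-- ===== SOURCE B (Python) =====
-- def maximumRobots(chargeTimes: list, runningCosts: list, budget: int) -> int:
--     # Same two-pointer advance of `left`, but with NO monotonic queue and NO running
--     # sum: the window's max charge time and total running cost are recomputed from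
--     # slices at each check.
--     def window_cost(left: int, right: int) -> int:
--         k = right - left + 1
--         return max(chargeTimes[left:right + 1]) + k * sum(runningCosts[left:right + 1])
--
--     n = min(len(chargeTimes), len(runningCosts))
--     ans = 0
--     left = 0
--     for right in range(n):
--         while left <= right and window_cost(left, right) > budget:
--             left += 1
--         ans = max(ans, right - left + 1)
--     return ans
-- ===== Notes on version B (the rewrite author's own statement) =====
-- stated objective: simpler
-- what changed: The monotonic queue and the incrementally maintained window sum are removed entirely: B advances the same two pointers but recomputes the window's max charge time and running-cost sum directly from slices at every check, making the code markedly shorter and plainer.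
import Mathlib
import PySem

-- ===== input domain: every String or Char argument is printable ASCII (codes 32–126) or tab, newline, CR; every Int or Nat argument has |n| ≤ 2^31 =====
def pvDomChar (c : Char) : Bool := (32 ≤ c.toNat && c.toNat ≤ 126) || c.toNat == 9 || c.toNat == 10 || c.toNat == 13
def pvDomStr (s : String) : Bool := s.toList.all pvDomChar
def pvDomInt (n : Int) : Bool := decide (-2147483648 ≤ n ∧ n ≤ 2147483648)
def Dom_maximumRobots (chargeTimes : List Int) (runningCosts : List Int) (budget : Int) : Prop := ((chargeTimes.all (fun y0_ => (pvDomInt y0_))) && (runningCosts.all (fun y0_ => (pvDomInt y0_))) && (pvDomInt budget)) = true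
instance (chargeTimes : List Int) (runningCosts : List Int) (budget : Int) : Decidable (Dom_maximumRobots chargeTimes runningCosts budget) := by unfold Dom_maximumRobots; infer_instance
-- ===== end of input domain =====

-- B replaces A's monotonic queue and incrementally maintained window sum by direct
-- recomputation of the window max / sum from slices at each check (simpler, not faster).

-- ===== PORT A =====
-- Inner `while` popping dominated indices from the Python back of the monotonic queue.
-- The queue is stored most-recent-first, so Python's `q[-1]`/`pop()` act on our head,
-- `q[0]`/`pop(0)` on our last element.  `t >= chargeTimes[q[-1]]` is `ct.getD j 0 ≤ t`
-- (getD is exact here: queue entries are always in range).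
def pvPopBack (ct : List Int) (t : Int) : List Nat → List Nat
  | [] => []
  | j :: rest => if ct.getD j 0 ≤ t then pvPopBack ct t rest else j :: rest

-- Inner `while` advancing `left`.  `fuel` only makes the loop total: `left` never passes
-- `right+1` (the queue empties there), so `right+1` fuel never runs out on a real run.
def pvLeftLoop (ct rc : List Int) (budget : Int) (right : Nat) :
    Nat → Nat × Int × List Nat → Nat × Int × List Nat
  | 0, st => st
  | fuel+1, (left, s, q) =>
    match q.getLast? with
    | none => (left, s, q)
    | some j =>
      if budget < ct.getD j 0 + ((right : Int) - (left : Int) + 1) * s then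
        pvLeftLoop ct rc budget right fuel
          (left + 1, s - rc.getD left 0, if j = left then q.dropLast else q)
      else (left, s, q)

-- body of `for right, (t, c) in enumerate(zip(chargeTimes, runningCosts))`
def pvStepA (ct rc : List Int) (budget : Int) (st : Int × Nat × Int × List Nat)
    (p : (Int × Int) × Nat) : Int × Nat × Int × List Nat :=
  let ans := st.1
  let left := st.2.1
  let s := st.2.2.1
  let q := st.2.2.2
  let right := p.2
  let q1 := right :: pvPopBack ct p.1.1 q          -- pop back, then append `right`
  let s1 := s + p.1.2                              -- s += c
  let st2 := pvLeftLoop ct rc budget right (right + 1) (left, s1, q1)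
  (max ans ((right : Int) - (st2.1 : Int) + 1), st2)

def maximumRobots (chargeTimes : List Int) (runningCosts : List Int) (budget : Int) : Int :=
  ((chargeTimes.zip runningCosts).zipIdx.foldl
    (pvStepA chargeTimes runningCosts budget) (0, 0, 0, [])).1

-- ===== PORT B =====
-- max(ct[l:r+1]) + (r-l+1) * sum(rc[l:r+1]); the max default is never used (l ≤ r).
def pvWindowCost (ct rc : List Int) (left right : Nat) : Int :=
  let w := (ct.drop left).take (right + 1 - left)
  let u := (rc.drop left).take (right + 1 - left)
  (PySem.List.max? w (fun y => y)).getD 0 + ((right : Int) - (left : Int) + 1) * u.sum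

-- `while left <= right and window_cost(left, right) > budget: left += 1`
def pvAdvance (ct rc : List Int) (budget : Int) (right : Nat) (left : Nat) : Nat :=
  if left ≤ right ∧ budget < pvWindowCost ct rc left right then
    pvAdvance ct rc budget right (left + 1)
  else left
termination_by right + 1 - left

def maximumRobots_alt (chargeTimes : List Int) (runningCosts : List Int) (budget : Int) : Int :=
  ((List.range (min chargeTimes.length runningCosts.length)).foldl
    (fun (st : Int × Nat) right =>
      let l := pvAdvance chargeTimes runningCosts budget right st.2
      (max st.1 ((right : Int) - (l : Int) + 1), l))
    (0, 0)).1

-- ===== PRECONDITION & SPEC =====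
def Spec_maximumRobots (chargeTimes : List Int) (runningCosts : List Int) (budget : Int) (out : Int) : Prop := out = maximumRobots_alt chargeTimes runningCosts budget
instance (chargeTimes : List Int) (runningCosts : List Int) (budget : Int) (out : Int) : Decidable (Spec_maximumRobots chargeTimes runningCosts budget out) := by unfold Spec_maximumRobots; infer_instance

-- ===== CLAIM (what is proved, stated in full; the proofs are below) =====
def Claim_equal_maximumRobots : Prop := ∀ (chargeTimes : List Int) (runningCosts : List Int) (budget : Int), Dom_maximumRobots chargeTimes runningCosts budget → Spec_maximumRobots chargeTimes runningCosts budget (maximumRobots chargeTimes runningCosts budget)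

-- ===== LEMMAS AND PROOFS =====

-- The state invariant tying A's loop state after processing indices [0, b) to the
-- window [left, b): s is the window's running-cost sum, q (most-recent-first) holds
-- exactly enough indices that its Python front (our last) carries the window max.
def pvInv (ct rc : List Int) (b left : Nat) (s : Int) (q : List Nat) : Prop :=
  left ≤ b ∧
  s = ((rc.drop left).take (b - left)).sum ∧
  (∀ j ∈ q, left ≤ j ∧ j < b) ∧
  q.Pairwise (fun a a' => a' < a ∧ ct.getD a 0 < ct.getD a' 0) ∧
  (∀ i, left ≤ i → i < b → ∃ j ∈ q, i ≤ j ∧ ct.getD i 0 ≤ ct.getD j 0)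

lemma pv_mem_window_iff (ct : List Int) (l b : Nat) (hb : b ≤ ct.length) (y : Int) :
    y ∈ (ct.drop l).take (b - l) ↔ ∃ i, l ≤ i ∧ i < b ∧ ct.getD i 0 = y := by
  constructor
  · intro hy
    obtain ⟨k, hk, he⟩ := List.mem_iff_getElem.1 hy
    simp only [List.length_take, List.length_drop] at hk
    refine ⟨l + k, by omega, by omega, ?_⟩
    rw [List.getD_eq_getElem _ _ (by omega), ← he]
    simp [List.getElem_take, List.getElem_drop]
  · rintro ⟨i, hli, hib, he⟩
    rw [List.mem_iff_getElem]
    refine ⟨i - l, by simp [List.length_take, List.length_drop]; omega, ?_⟩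
    rw [List.getElem_take, List.getElem_drop, ← he, List.getD_eq_getElem _ _ (by omega)]
    congr 1; omega

lemma pv_sum_push (rc : List Int) (l b : Nat) (hl : l ≤ b) (hb : b < rc.length) :
    ((rc.drop l).take (b + 1 - l)).sum = ((rc.drop l).take (b - l)).sum + rc.getD b 0 := by
  have h1 : b + 1 - l = (b - l) + 1 := by omega
  rw [h1, List.take_add_one]
  have h2 : (rc.drop l)[b - l]? = some rc[b] := by
    rw [List.getElem?_drop, List.getElem?_eq_getElem (by omega)]
    congr 1; congr 1; omega
  rw [h2]
  simp [List.getD_eq_getElem?_getD, List.getElem?_eq_getElem hb]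

lemma pv_sum_shrink (rc : List Int) (l b : Nat) (hl : l < b) (hb : b ≤ rc.length) :
    ((rc.drop (l + 1)).take (b - (l + 1))).sum = ((rc.drop l).take (b - l)).sum - rc.getD l 0 := by
  have hd : rc.drop l = rc[l] :: rc.drop (l + 1) := List.drop_eq_getElem_cons (by omega)
  have h1 : b - l = (b - (l + 1)) + 1 := by omega
  rw [hd, h1, List.take_succ_cons]
  simp [List.getD_eq_getElem?_getD, List.getElem?_eq_getElem (show l < rc.length by omega)]

lemma pv_last_rel {R : Nat → Nat → Prop} {q : List Nat} {z : Nat}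
    (hp : q.Pairwise R) (hz : q.getLast? = some z) :
    ∀ x ∈ q.dropLast, R x z := by
  have hq : q ≠ [] := by rintro rfl; simp at hz
  have hdec : q.dropLast ++ [q.getLast hq] = q := List.dropLast_append_getLast hq
  have hz' : q.getLast hq = z := by
    rw [List.getLast?_eq_some_getLast hq] at hz
    exact Option.some.inj hz
  rw [← hdec, List.pairwise_append] at hp
  intro x hx
  have := hp.2.2 x hx (q.getLast hq) (by simp)
  rwa [hz'] at this

lemma pv_last_mem {q : List Nat} {z : Nat} (hz : q.getLast? = some z) : z ∈ q := by
  have hq : q ≠ [] := by rintro rfl; simp at hz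
  rw [List.getLast?_eq_some_getLast hq] at hz
  exact (Option.some.inj hz) ▸ List.getLast_mem hq

lemma pv_mem_split {q : List Nat} {z : Nat} (hz : q.getLast? = some z) :
    ∀ x ∈ q, x ∈ q.dropLast ∨ x = z := by
  have hq : q ≠ [] := by rintro rfl; simp at hz
  rw [List.getLast?_eq_some_getLast hq] at hz
  intro x hx
  rw [← List.dropLast_append_getLast hq] at hx
  rcases List.mem_append.1 hx with h | h
  · exact Or.inl h
  · right; simp at h; rw [h, ← Option.some.inj hz]

lemma pv_popBack_sublist (ct : List Int) (t : Int) (q : List Nat) :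
    (pvPopBack ct t q).Sublist q := by
  induction q with
  | nil => simp [pvPopBack]
  | cons j rest ih =>
    simp only [pvPopBack]
    split
    · exact ih.trans (List.sublist_cons_self j rest)
    · exact List.Sublist.refl _

lemma pv_popBack_mem (ct : List Int) (t : Int) (q : List Nat) (j : Nat) (hj : j ∈ q) :
    j ∈ pvPopBack ct t q ∨ ct.getD j 0 ≤ t := by
  induction q with
  | nil => simp at hj
  | cons h rest ih =>
    simp only [pvPopBack]
    split
    · rcases List.mem_cons.1 hj with rfl | hm
      · right; assumption
      · exact ih hm
    · left; exact hj

lemma pv_popBack_gt (ct : List Int) (t : Int) (q : List Nat)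
    (hp : q.Pairwise (fun a a' => a' < a ∧ ct.getD a 0 < ct.getD a' 0)) :
    ∀ x ∈ pvPopBack ct t q, t < ct.getD x 0 := by
  induction q with
  | nil => simp [pvPopBack]
  | cons h rest ih =>
    simp only [pvPopBack]
    split
    · exact ih hp.of_cons
    · intro x hx
      rcases List.mem_cons.1 hx with rfl | hm
      · omega
      · have := (List.pairwise_cons.1 hp).1 x hm
        omega

lemma pv_inv_empty_iff (ct rc : List Int) (b left : Nat) (s : Int) (q : List Nat)
    (h : pvInv ct rc b left s q) : q = [] ↔ left = b := by
  obtain ⟨h1, _, h3, _, h5⟩ := h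
  constructor
  · intro hq
    by_contra hne
    obtain ⟨j, hj, _⟩ := h5 left le_rfl (by omega)
    simp [hq] at hj
  · intro hb
    subst hb
    cases q with
    | nil => rfl
    | cons x xs =>
      have := h3 x (by simp)
      omega

lemma pv_inv_push (ct rc : List Int) (b left : Nat) (s : Int) (q : List Nat)
    (h : pvInv ct rc b left s q) (hbc : b < ct.length) (hbr : b < rc.length) :
    pvInv ct rc (b + 1) left (s + rc.getD b 0) (b :: pvPopBack ct (ct.getD b 0) q) := by
  obtain ⟨h1, h2, h3, h4, h5⟩ := h
  refine ⟨by omega, ?_, ?_, ?_, ?_⟩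
  · rw [pv_sum_push rc left b h1 hbr, h2]
  · intro j hj
    rcases List.mem_cons.1 hj with rfl | hm
    · omega
    · have := h3 j ((pv_popBack_sublist ct _ q).mem hm)
      omega
  · rw [List.pairwise_cons]
    refine ⟨?_, h4.sublist (pv_popBack_sublist ct _ q)⟩
    intro x hx
    exact ⟨(h3 x ((pv_popBack_sublist ct _ q).mem hx)).2, pv_popBack_gt ct _ q h4 x hx⟩
  · intro i hli hib
    by_cases hib' : i = b
    · exact ⟨b, by simp, by omega, by rw [hib']⟩
    · obtain ⟨j, hj, hij, hv⟩ := h5 i hli (by omega)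
      rcases pv_popBack_mem ct (ct.getD b 0) q j hj with hin | hle
      · exact ⟨j, List.mem_cons.2 (Or.inr hin), hij, hv⟩
      · exact ⟨b, by simp, by omega, by omega⟩

lemma pv_inv_shrink (ct rc : List Int) (b left : Nat) (s : Int) (q : List Nat) (j : Nat)
    (h : pvInv ct rc b left s q) (hj : q.getLast? = some j) (hbr : b ≤ rc.length) :
    pvInv ct rc b (left + 1) (s - rc.getD left 0)
      (if j = left then q.dropLast else q) := by
  obtain ⟨h1, h2, h3, h4, h5⟩ := h
  have hqne : q ≠ [] := by rintro rfl; simp at hj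
  have hlb : left < b := by
    rcases Nat.lt_or_ge left b with h | h
    · exact h
    · exact absurd ((pv_inv_empty_iff ct rc b left s q ⟨h1, h2, h3, h4, h5⟩).2 (by omega)) hqne
  have hjq : j ∈ q := pv_last_mem hj
  refine ⟨by omega, ?_, ?_, ?_, ?_⟩
  · rw [pv_sum_shrink rc left b hlb hbr, h2]
  · intro x hx
    split at hx
    · have hlt := pv_last_rel h4 hj x hx
      have := h3 x ((List.dropLast_sublist q).mem hx)
      omega
    · rename_i hne
      have hxb := h3 x hx
      have hjl : left < j := by have := h3 j hjq; omega
      rcases pv_mem_split hj x hx with hd | rfl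
      · have := pv_last_rel h4 hj x hd; omega
      · omega
  · split
    · exact h4.sublist (List.dropLast_sublist q)
    · exact h4
  · intro i hli hib
    obtain ⟨j', hj'q, hij', hv⟩ := h5 i (by omega) hib
    split
    · rename_i hjl
      subst hjl
      rcases pv_mem_split hj j' hj'q with hd | rfl
      · exact ⟨j', hd, hij', hv⟩
      · omega
    · exact ⟨j', hj'q, hij', hv⟩

lemma pv_cost_eq (ct rc : List Int) (r left : Nat) (s : Int) (q : List Nat) (j : Nat)
    (h : pvInv ct rc (r + 1) left s q) (hj : q.getLast? = some j)
    (hbc : r + 1 ≤ ct.length) :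
    pvWindowCost ct rc left r = ct.getD j 0 + ((r : Int) - (left : Int) + 1) * s := by
  obtain ⟨h1, h2, h3, h4, h5⟩ := h
  have hjq : j ∈ q := pv_last_mem hj
  have hjw : ct.getD j 0 ∈ (ct.drop left).take (r + 1 - left) :=
    (pv_mem_window_iff ct left (r + 1) hbc _).2 ⟨j, (h3 j hjq).1, (h3 j hjq).2, rfl⟩
  have hub : ∀ y ∈ (ct.drop left).take (r + 1 - left), y ≤ ct.getD j 0 := by
    intro y hy
    obtain ⟨i, hli, hib, rfl⟩ := (pv_mem_window_iff ct left (r + 1) hbc y).1 hy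
    obtain ⟨j', hj'q, hij', hv⟩ := h5 i hli hib
    have : ct.getD j' 0 ≤ ct.getD j 0 := by
      rcases pv_mem_split hj j' hj'q with hd | rfl
      · exact le_of_lt (pv_last_rel h4 hj j' hd).2
      · exact le_rfl
    omega
  cases hm : PySem.List.max? ((ct.drop left).take (r + 1 - left)) (fun y => y) with
  | none =>
    rw [PySem.List.max?_eq_none_iff] at hm
    rw [hm] at hjw
    simp at hjw
  | some m =>
    have hmw := PySem.List.max?_mem hm
    have hmax := PySem.List.max?_isMax hm
    have hme : m = ct.getD j 0 := le_antisymm (hub m hmw) (hmax _ hjw)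
    simp only [pvWindowCost, hm, Option.getD_some, hme, h2]

lemma pv_loop_eq (ct rc : List Int) (budget : Int) (r : Nat) :
    ∀ fuel left s q, pvInv ct rc (r + 1) left s q → r + 1 ≤ ct.length → r + 1 ≤ rc.length →
      r + 1 - left ≤ fuel →
      ∃ s' q', pvLeftLoop ct rc budget r fuel (left, s, q) =
          (pvAdvance ct rc budget r left, s', q') ∧
        pvInv ct rc (r + 1) (pvAdvance ct rc budget r left) s' q' := by
  intro fuel
  induction fuel with
  | zero =>
    intro left s q hinv hbc hbr hfuel
    have hleft : left = r + 1 := by have := hinv.1; omega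
    refine ⟨s, q, ?_, ?_⟩ <;>
      rw [pvAdvance, if_neg (fun hcon => by omega)] <;> first | rfl | exact hinv
  | succ fuel ih =>
    intro left s q hinv hbc hbr hfuel
    cases hq : q.getLast? with
    | none =>
      have hqe : q = [] := List.getLast?_eq_none_iff.1 hq
      have hleft : left = r + 1 := (pv_inv_empty_iff ct rc _ _ _ _ hinv).1 hqe
      refine ⟨s, q, ?_, ?_⟩ <;>
        rw [pvAdvance, if_neg (fun hcon => by omega)]
      · simp only [pvLeftLoop, hq]
      · exact hinv
    | some j =>
      have hlb : left < r + 1 := by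
        rcases Nat.lt_or_ge left (r + 1) with h | h
        · exact h
        · have hle : left = r + 1 := by have := hinv.1; omega
          have : q = [] := (pv_inv_empty_iff ct rc _ _ _ _ hinv).2 hle
          rw [this] at hq; simp at hq
      have hcost := pv_cost_eq ct rc r left s q j hinv hq hbc
      by_cases hc : budget < ct.getD j 0 + ((r : Int) - (left : Int) + 1) * s
      · have hinv' := pv_inv_shrink ct rc (r + 1) left s q j hinv hq hbr
        obtain ⟨s', q', heq, hinv''⟩ := ih (left + 1) _ _ hinv' hbc hbr (by omega)
        have hadv : pvAdvance ct rc budget r left = pvAdvance ct rc budget r (left + 1) := by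
          rw [pvAdvance, if_pos ⟨by omega, by rw [hcost]; exact hc⟩]
        refine ⟨s', q', ?_, ?_⟩
        · simp only [pvLeftLoop, hq, if_pos hc]
          rw [hadv]; exact heq
        · rw [hadv]; exact hinv''
      · have hadv : pvAdvance ct rc budget r left = left := by
          rw [pvAdvance, if_neg (fun hcon => hc (by rw [← hcost]; exact hcon.2))]
        refine ⟨s, q, ?_, ?_⟩
        · simp only [pvLeftLoop, hq, if_neg hc]
          rw [hadv]
        · rw [hadv]; exact hinv

lemma pv_zip_zipIdx (ct rc : List Int) :
    (ct.zip rc).zipIdx =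
      (List.range (min ct.length rc.length)).map (fun i => ((ct.getD i 0, rc.getD i 0), i)) := by
  apply List.ext_getElem
  · simp
  · intro k h1 h2
    simp only [List.length_zipIdx, List.length_zip] at h1
    simp [List.getElem_zipIdx, List.getElem_zip, List.getD_eq_getElem?_getD,
      List.getElem?_eq_getElem (show k < ct.length by omega),
      List.getElem?_eq_getElem (show k < rc.length by omega)]

lemma pv_main (ct rc : List Int) (budget : Int) (m : Nat)
    (hm : m ≤ min ct.length rc.length) :
    ((List.range m).foldl
        (fun st i => pvStepA ct rc budget st ((ct.getD i 0, rc.getD i 0), i)) (0, 0, 0, [])).1 =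
      ((List.range m).foldl
        (fun (st : Int × Nat) right =>
          let l := pvAdvance ct rc budget right st.2
          (max st.1 ((right : Int) - (l : Int) + 1), l)) (0, 0)).1 ∧
    ((List.range m).foldl
        (fun st i => pvStepA ct rc budget st ((ct.getD i 0, rc.getD i 0), i)) (0, 0, 0, [])).2.1 =
      ((List.range m).foldl
        (fun (st : Int × Nat) right =>
          let l := pvAdvance ct rc budget right st.2
          (max st.1 ((right : Int) - (l : Int) + 1), l)) (0, 0)).2 ∧
    pvInv ct rc m
      ((List.range m).foldl
        (fun st i => pvStepA ct rc budget st ((ct.getD i 0, rc.getD i 0), i)) (0, 0, 0, [])).2.1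
      ((List.range m).foldl
        (fun st i => pvStepA ct rc budget st ((ct.getD i 0, rc.getD i 0), i)) (0, 0, 0, [])).2.2.1
      ((List.range m).foldl
        (fun st i => pvStepA ct rc budget st ((ct.getD i 0, rc.getD i 0), i)) (0, 0, 0, [])).2.2.2 := by
  induction m with
  | zero =>
    refine ⟨rfl, rfl, le_rfl, by simp, by simp, by simp, by omega⟩
  | succ m ih =>
    obtain ⟨ih1, ih2, ih3⟩ := ih (by omega)
    have h1 : m < ct.length := by have := Nat.min_le_left ct.length rc.length; omega
    have h2 : m < rc.length := by have := Nat.min_le_right ct.length rc.length; omega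
    rw [List.range_succ]
    simp only [List.foldl_append, List.foldl_cons, List.foldl_nil]
    set stA := (List.range m).foldl
        (fun st i => pvStepA ct rc budget st ((ct.getD i 0, rc.getD i 0), i))
        ((0 : Int), (0 : Nat), (0 : Int), ([] : List Nat)) with hstA
    set stB := (List.range m).foldl
        (fun (st : Int × Nat) right =>
          let l := pvAdvance ct rc budget right st.2
          (max st.1 ((right : Int) - (l : Int) + 1), l)) ((0 : Int), (0 : Nat)) with hstB
    have hpush := pv_inv_push ct rc m stA.2.1 stA.2.2.1 stA.2.2.2 ih3 h1 h2
    obtain ⟨s', q', heq, hinv'⟩ :=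
      pv_loop_eq ct rc budget m (m + 1) stA.2.1 (stA.2.2.1 + rc.getD m 0)
        (m :: pvPopBack ct (ct.getD m 0) stA.2.2.2) hpush (by omega) (by omega) (by omega)
    simp only [pvStepA]
    rw [heq, ih1, ih2]
    rw [ih2] at hinv'
    exact ⟨rfl, rfl, hinv'⟩

-- ===== VERDICT (by name: the statement is the Claim_ definition above) =====
theorem maximumRobots_spec : Claim_equal_maximumRobots := by
  intro ct rc budget _
  unfold Spec_maximumRobots maximumRobots maximumRobots_alt
  rw [pv_zip_zipIdx, List.foldl_map]
  exact (pv_main ct rc budget (min ct.length rc.length) le_rfl).1
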